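-- pv_equiv track=rewrite | github.com/aimanmaniyar-123/seo_backend_ver2 | onpageseoagents.py | canonical_tag_management
-- ===== SOURCE A (Python) =====
-- def canonical_tag_management(pages_urls: dict = None, duplicate_content: dict = None):
--     """Manage canonical tags for duplicate content"""
--     if not pages_urls:
--         return {"error": "No page URLs provided"}
--
--     canonical_assignments = {}
--     seen_urls = {}
--
--     for page, url in pages_urls.items():
--         if url in seen_urls:
--             canonical_assignments[page] = seen_urls[url]
--         else:
--             canonical_assignments[page] = url
--             seen_urls[url] = url
--
--     return {"canonical_assignments": canonical_assignments}
-- ===== SOURCE B (Python) =====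
-- def canonical_tag_management(pages_urls: dict = None, duplicate_content: dict = None):
--     """Manage canonical tags for duplicate content"""
--     if not pages_urls:
--         return {"error": "No page URLs provided"}
--     # Every page's canonical URL is simply its own URL (A's seen_urls always
--     # maps url -> url), so the result is a plain copy of the input mapping.
--     return {"canonical_assignments": dict(pages_urls)}
-- ===== Notes on version B (the rewrite author's own statement) =====
-- stated objective: simpler
-- what changed: B drops A's seen_urls dict and the per-element membership branch entirely: since seen_urls only ever maps url->url, A's loop always assigns each page its own url, so B returns a direct copy of the input mapping with no loop and no auxiliary structure.
import Mathlib
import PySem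

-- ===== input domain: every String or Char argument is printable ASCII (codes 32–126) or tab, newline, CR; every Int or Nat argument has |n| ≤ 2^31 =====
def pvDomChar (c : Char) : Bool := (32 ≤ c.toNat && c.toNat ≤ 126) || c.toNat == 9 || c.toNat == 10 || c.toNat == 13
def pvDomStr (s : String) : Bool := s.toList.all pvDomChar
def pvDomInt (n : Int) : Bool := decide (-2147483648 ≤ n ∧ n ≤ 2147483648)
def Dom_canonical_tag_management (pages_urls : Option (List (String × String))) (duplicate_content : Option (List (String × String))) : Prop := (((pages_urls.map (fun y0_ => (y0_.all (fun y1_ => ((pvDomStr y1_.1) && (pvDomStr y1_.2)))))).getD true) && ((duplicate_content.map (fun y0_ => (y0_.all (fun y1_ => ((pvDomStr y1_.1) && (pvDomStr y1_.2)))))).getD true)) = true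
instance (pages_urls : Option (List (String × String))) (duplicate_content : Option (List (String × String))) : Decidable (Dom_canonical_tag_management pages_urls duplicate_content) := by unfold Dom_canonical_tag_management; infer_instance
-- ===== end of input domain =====

-- B replaces A's seen_urls bookkeeping and per-element branch by a direct copy of the
-- input mapping (simpler; A's seen_urls only ever maps url -> url, so the branch is dead).

-- ===== PORT A =====
-- one loop step of A: (canonical_assignments, seen_urls) updated for one (page, url) item
def pvStepA (st : PySem.Dict String String × PySem.Dict String String)
    (pu : String × String) : PySem.Dict String String × PySem.Dict String String :=
  match st.2.get? pu.2 with
  | some u => (st.1.insert pu.1 u, st.2)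
  | none => (st.1.insert pu.1 pu.2, st.2.insert pu.2 pu.2)

def canonical_tag_management (pages_urls : Option (List (String × String))) (duplicate_content : Option (List (String × String))) : List (String × List (String × String)) :=
  match pages_urls with
  | none => []  -- Python returns {"error": …} (a str value, not of the return type); excluded by Pre_
  | some l =>
    if l = [] then []  -- same error branch ('not pages_urls'); excluded by Pre_
    else
      let st := l.foldl pvStepA (PySem.Dict.empty, PySem.Dict.empty)
      [("canonical_assignments", st.1.items)]

-- ===== PORT B =====
def canonical_tag_management_alt (pages_urls : Option (List (String × String))) (duplicate_content : Option (List (String × String))) : List (String × List (String × String)) :=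
  match pages_urls with
  | none => []  -- error branch, excluded by Pre_
  | some l =>
    if l = [] then []  -- error branch, excluded by Pre_
    else [("canonical_assignments", (PySem.Dict.ofList l).items)]

-- ===== PRECONDITION & SPEC =====
-- Pre_ excludes inputs where Python A returns {"error": "No page URLs provided"}, whose
-- value "No page URLs provided" is a str, not a value of the declared dict[str,str] type.
def Pre_canonical_tag_management (pages_urls : Option (List (String × String))) (duplicate_content : Option (List (String × String))) : Prop :=
  pages_urls.getD [] ≠ []
instance (pages_urls : Option (List (String × String))) (duplicate_content : Option (List (String × String))) : Decidable (Pre_canonical_tag_management pages_urls duplicate_content) := by unfold Pre_canonical_tag_management; infer_instance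

def pvWitness_canonical_tag_management : (Option (List (String × String))) × (Option (List (String × String))) :=
  (some [("page1", "http://u"), ("page2", "http://u")], none)

def Spec_canonical_tag_management (pages_urls : Option (List (String × String))) (duplicate_content : Option (List (String × String))) (out : List (String × List (String × String))) : Prop := out = canonical_tag_management_alt pages_urls duplicate_content
instance (pages_urls : Option (List (String × String))) (duplicate_content : Option (List (String × String))) (out : List (String × List (String × String))) : Decidable (Spec_canonical_tag_management pages_urls duplicate_content out) := by unfold Spec_canonical_tag_management; infer_instance

-- ===== CLAIM (what is proved, stated in full; the proofs are below) =====
def Claim_equal_canonical_tag_management : Prop := ∀ (pages_urls : Option (List (String × String))) (duplicate_content : Option (List (String × String))), Dom_canonical_tag_management pages_urls duplicate_content → Pre_canonical_tag_management pages_urls duplicate_content → Spec_canonical_tag_management pages_urls duplicate_content (canonical_tag_management pages_urls duplicate_content)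

-- ===== LEMMAS AND PROOFS =====

-- A's loop invariant: whenever seen_urls maps u to u', u' = u; then the canonical
-- component of A's fold is just the plain insert-fold of the items.
lemma pvLoopA_eq (l : List (String × String)) (ca seen : PySem.Dict String String)
    (h : ∀ u u', seen.get? u = some u' → u' = u) :
    (l.foldl pvStepA (ca, seen)).1 = l.foldl (fun d p => d.insert p.1 p.2) ca := by
  induction l generalizing ca seen with
  | nil => rfl
  | cons p t ih =>
    simp only [List.foldl_cons]
    unfold pvStepA
    cases hg : seen.get? p.2 with
    | some u =>
      have : u = p.2 := h _ _ hg
      subst this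
      exact ih (ca.insert p.1 p.2) seen h
    | none =>
      refine ih (ca.insert p.1 p.2) (seen.insert p.2 p.2) ?_
      intro u u' hu
      rw [PySem.Dict.get?_insert] at hu
      split_ifs at hu with he
      · subst he; exact (Option.some.inj hu).symm
      · exact h _ _ hu

theorem canonical_tag_management_spec : Claim_equal_canonical_tag_management := by
  intro pages_urls duplicate_content _ hpre
  unfold Spec_canonical_tag_management canonical_tag_management canonical_tag_management_alt
  cases pages_urls with
  | none => rfl
  | some l =>
    cases l with
    | nil => simp [Pre_canonical_tag_management] at hpre
    | cons p t =>
      simp only [if_neg (List.cons_ne_nil p t)]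
      have := pvLoopA_eq (p :: t) PySem.Dict.empty PySem.Dict.empty
        (by intro u u' hu; simp [PySem.Dict.get?_empty] at hu)
      rw [this]
      rfl
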